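-- pv_equiv track=rewrite | github.com/sobarine21/newjira | streamlit_app.py | grammar_check
-- ===== SOURCE A (Python) =====
-- def grammar_check(text):
--     corrections = {
--         "recieve": "receive",
--         "adress": "address",
--         "teh": "the",
--         "occured": "occurred"
--     }
--     for word, correct in corrections.items():
--         text = text.replace(word, correct)
--     return text
-- ===== SOURCE B (Python) =====
-- def grammar_check(text):
--     corrections = [
--         ("recieve", "receive"),
--         ("adress", "address"),
--         ("teh", "the"),
--         ("occured", "occurred"),
--     ]
--     out = []
--     i = 0
--     n = len(text)
--     while i < n:
--         for word, correct in corrections: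
--             if text.startswith(word, i):
--                 out.append(correct)
--                 i += len(word)
--                 break
--         else:
--             out.append(text[i])
--             i += 1
--     return "".join(out)
-- ===== Notes on version B (the rewrite author's own statement) =====
-- stated objective: alternative
-- what changed: A makes four sequential full-string str.replace passes (one per correction); B makes a single left-to-right scan that tries all four corrections at each position and emits output once, relying on the corrections being mutually non-interfering.
import Mathlib
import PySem

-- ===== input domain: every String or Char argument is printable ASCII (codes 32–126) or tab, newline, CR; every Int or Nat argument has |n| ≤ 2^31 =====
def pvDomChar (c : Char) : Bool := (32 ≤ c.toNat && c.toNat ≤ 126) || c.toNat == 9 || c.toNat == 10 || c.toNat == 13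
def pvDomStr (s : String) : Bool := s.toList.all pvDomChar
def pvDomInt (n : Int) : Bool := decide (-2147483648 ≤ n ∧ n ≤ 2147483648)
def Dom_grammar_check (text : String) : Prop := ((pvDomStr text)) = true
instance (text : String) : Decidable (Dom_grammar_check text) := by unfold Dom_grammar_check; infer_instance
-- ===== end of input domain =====

-- B replaces A's four sequential str.replace passes by ONE left-to-right scan that tries all
-- four corrections at each position (objective: alternative single-pass algorithm, same result).

-- ===== PORT A =====
def grammar_check (text : String) : String :=
  let corrections : PySem.Dict String String :=
    ((((PySem.Dict.empty).insert "recieve" "receive").insert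
        "adress" "address").insert "teh" "the").insert "occured" "occurred"
  corrections.items.foldl (fun t wc => PySem.Str.replace t wc.1 wc.2) text

-- ===== PORT B =====
-- Source B's while loop: at position i, try the corrections in dict order; on a match emit the
-- correction and jump past the misspelt word, otherwise emit the character and move on.
def pvScan : List Char → List Char
  | [] => []
  | c :: t =>
    if List.isPrefixOf "recieve".toList (c :: t) then "receive".toList ++ pvScan (t.drop 6)
    else if List.isPrefixOf "adress".toList (c :: t) then "address".toList ++ pvScan (t.drop 5)
    else if List.isPrefixOf "teh".toList (c :: t) then "the".toList ++ pvScan (t.drop 2)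
    else if List.isPrefixOf "occured".toList (c :: t) then "occurred".toList ++ pvScan (t.drop 6)
    else c :: pvScan t
  termination_by l => l.length
  decreasing_by all_goals (simp only [List.length_drop, List.length_cons]; omega)

def grammar_check_alt (text : String) : String :=
  String.ofList (pvScan text.toList)

-- ===== PRECONDITION & SPEC =====
def Spec_grammar_check (text : String) (out : String) : Prop := out = grammar_check_alt text
instance (text : String) (out : String) : Decidable (Spec_grammar_check text out) := by unfold Spec_grammar_check; infer_instance

-- ===== CLAIM (what is proved, stated in full; the proofs are below) =====
def Claim_equal_grammar_check : Prop := ∀ (text : String), Dom_grammar_check text → Spec_grammar_check text (grammar_check text)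

-- ===== LEMMAS AND PROOFS =====

-- one str.replace pass, written as the natural structural recursion (proof-side mirror of
-- PySem.Chars.replace's fuelled loop)
def repl1 (old nw : List Char) : List Char → List Char
  | [] => []
  | c :: t =>
    if old.isPrefixOf (c :: t) then nw ++ repl1 old nw (t.drop (old.length - 1))
    else c :: repl1 old nw t
  termination_by l => l.length
  decreasing_by all_goals (simp only [List.length_drop, List.length_cons]; omega)

-- `agrees a b`: a and b coincide on their common length (so neither can start where the other does
-- and still differ there)
def agrees (a b : List Char) : Bool := (a.zip b).all fun p => p.1 == p.2

theorem agrees_of_isPrefixOf_append (u z w : List Char) (h : u.isPrefixOf (z ++ w) = true) :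
    agrees u z = true := by
  induction u generalizing z with
  | nil => simp [agrees]
  | cons a u' ih =>
    cases z with
    | nil => simp [agrees]
    | cons b z' =>
      simp only [List.cons_append, List.isPrefixOf, Bool.and_eq_true] at h
      simp only [agrees, List.zip, List.zipWith, List.all_cons, Bool.and_eq_true]
      exact ⟨h.1, ih z' h.2⟩

theorem repl1_nil (old nw : List Char) : repl1 old nw [] = [] := by simp [repl1]

theorem repl1_cons_pos (old nw : List Char) (c : Char) (t : List Char)
    (h : old.isPrefixOf (c :: t) = true) :
    repl1 old nw (c :: t) = nw ++ repl1 old nw (t.drop (old.length - 1)) := by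
  rw [repl1]; simp [h]

theorem repl1_cons_neg (old nw : List Char) (c : Char) (t : List Char)
    (h : old.isPrefixOf (c :: t) = false) :
    repl1 old nw (c :: t) = c :: repl1 old nw t := by
  rw [repl1]; simp [h]

-- a pass whose word matches right at the front consumes the word and emits the correction
theorem repl1_match (old nw x : List Char) (a : Char) (old') (hK : old = a :: old') :
    repl1 old nw (old ++ x) = nw ++ repl1 old nw x := by
  subst hK
  rw [List.cons_append,
    repl1_cons_pos _ _ _ _ (List.isPrefixOf_iff_prefix.mpr
      (by rw [← List.cons_append]; exact List.prefix_append _ _))]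
  simp

-- a pass slides over a prefix p in which its word can start nowhere
theorem repl1_cross (old nw : List Char) (p : List Char)
    (hp : ∀ k, k < p.length → agrees old (p.drop k) = false) (x : List Char) :
    repl1 old nw (p ++ x) = p ++ repl1 old nw x := by
  induction p with
  | nil => simp
  | cons c p' ih =>
    have hnp : old.isPrefixOf (c :: (p' ++ x)) = false := by
      cases hcon : old.isPrefixOf (c :: (p' ++ x)) with
      | false => rfl
      | true =>
        have := agrees_of_isPrefixOf_append old (c :: p') x (by simpa using hcon)
        have h0 := hp 0 (by simp)
        simp [this] at h0
    rw [List.cons_append, repl1_cons_neg _ _ _ _ hnp]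
    simp only [List.cons_append]
    congr 1
    exact ih (fun k hk => by simpa using hp (k + 1) (by simpa using hk))

-- a pass neither creates nor destroys a front occurrence of u, provided u can agree with
-- neither its word nor its correction at any offset
theorem repl1_pres (old nw : List Char) (x : List Char) : ∀ u : List Char,
    (∀ j, j < u.length → agrees (u.drop j) old = false ∧ agrees (u.drop j) nw = false) →
    u.isPrefixOf (repl1 old nw x) = u.isPrefixOf x := by
  induction x with
  | nil => intro u _; rw [repl1_nil]
  | cons c t ih =>
    intro u hu
    cases hp : old.isPrefixOf (c :: t) with
    | true =>
      rw [repl1_cons_pos _ _ _ _ hp]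
      cases u with
      | nil => simp
      | cons a u' =>
        have h0 := hu 0 (by simp)
        simp only [List.drop_zero] at h0
        have hL : (a :: u').isPrefixOf (nw ++ repl1 old nw (t.drop (old.length - 1))) = false := by
          cases h : (a :: u').isPrefixOf (nw ++ repl1 old nw (t.drop (old.length - 1))) with
          | false => rfl
          | true =>
            have := agrees_of_isPrefixOf_append (a :: u') nw _ h
            simp [this] at h0
        have hR : (a :: u').isPrefixOf (c :: t) = false := by
          cases h : (a :: u').isPrefixOf (c :: t) with
          | false => rfl
          | true =>
            obtain ⟨r, hr⟩ := List.isPrefixOf_iff_prefix.mp hp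
            have := agrees_of_isPrefixOf_append (a :: u') old r (by rw [hr]; exact h)
            simp [this] at h0
        rw [hL, hR]
    | false =>
      rw [repl1_cons_neg _ _ _ _ hp]
      cases u with
      | nil => simp
      | cons a u' =>
        simp only [List.isPrefixOf]
        rw [ih u' (fun j hj => by simpa using hu (j + 1) (by simpa using hj))]

-- PySem's fuelled replace loop computes repl1 (for a nonempty word and enough fuel)
theorem go_eq (old nw : List Char) (hK : old ≠ []) :
    ∀ (fuel : Nat) (l acc : List Char), l.length ≤ fuel →
      PySem.Chars.replace.go old nw fuel l acc = acc.reverse ++ repl1 old nw l := by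
  intro fuel
  induction fuel with
  | zero =>
    intro l acc hl
    have : l = [] := by cases l with | nil => rfl | cons a b => simp at hl
    subst this
    simp [PySem.Chars.replace.go, repl1_nil]
  | succ fuel ih =>
    intro l acc hl
    cases l with
    | nil => simp [PySem.Chars.replace.go, repl1_nil]
    | cons c t =>
      obtain ⟨a, old', rfl⟩ : ∃ a old', old = a :: old' := by
        cases old with | nil => exact absurd rfl hK | cons a b => exact ⟨a, b, rfl⟩
      cases h : (a :: old').isPrefixOf (c :: t) with
      | true =>
        rw [show PySem.Chars.replace.go (a :: old') nw (fuel + 1) (c :: t) acc =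
              PySem.Chars.replace.go (a :: old') nw fuel
                (List.drop (a :: old').length (c :: t)) (nw.reverse ++ acc) by
            simp [PySem.Chars.replace.go, h]]
        rw [ih _ _ (by simp at hl ⊢; omega)]
        rw [repl1_cons_pos _ _ _ _ h]
        simp [List.drop_succ_cons]
      | false =>
        rw [show PySem.Chars.replace.go (a :: old') nw (fuel + 1) (c :: t) acc =
              PySem.Chars.replace.go (a :: old') nw fuel t (c :: acc) by
            simp [PySem.Chars.replace.go, h]]
        rw [ih _ _ (by simp at hl ⊢; omega)]
        rw [repl1_cons_neg _ _ _ _ h]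
        simp

theorem replace_eq_repl1 (s old nw : List Char) (hK : old ≠ []) :
    PySem.Chars.replace s old nw = repl1 old nw s := by
  rw [PySem.Chars.replace]
  rw [if_neg (by simpa using hK)]
  simpa using go_eq old nw hK s.length s [] le_rfl

-- pvScan step lemmas
theorem pvScan_nil : pvScan [] = [] := by simp [pvScan]

theorem pvScan_cons (c : Char) (t : List Char) :
    pvScan (c :: t) =
    if List.isPrefixOf "recieve".toList (c :: t) then "receive".toList ++ pvScan (t.drop 6)
    else if List.isPrefixOf "adress".toList (c :: t) then "address".toList ++ pvScan (t.drop 5)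
    else if List.isPrefixOf "teh".toList (c :: t) then "the".toList ++ pvScan (t.drop 2)
    else if List.isPrefixOf "occured".toList (c :: t) then "occurred".toList ++ pvScan (t.drop 6)
    else c :: pvScan t := by
  rw [pvScan]

-- the four passes of A, composed, equal B's single scan
theorem four_eq_scan : ∀ (n : Nat) (l : List Char), l.length ≤ n →
    repl1 "occured".toList "occurred".toList
      (repl1 "teh".toList "the".toList
        (repl1 "adress".toList "address".toList
          (repl1 "recieve".toList "receive".toList l))) = pvScan l := by
  intro n
  induction n with
  | zero =>
    intro l hl
    have : l = [] := by cases l with | nil => rfl | cons a b => simp at hl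
    subst this
    simp [repl1_nil, pvScan_nil]
  | succ n ih =>
    intro l hl
    cases l with
    | nil => simp [repl1_nil, pvScan_nil]
    | cons c t =>
      simp only [List.length_cons] at hl
      cases h1 : List.isPrefixOf "recieve".toList (c :: t) with
      | true =>
        obtain ⟨r, hr⟩ := List.isPrefixOf_iff_prefix.mp h1
        have hlen : r.length ≤ n := by
          have := congrArg List.length hr
          simp at this; omega
        rw [← hr]
        rw [repl1_match "recieve".toList _ r 'r' "ecieve".toList rfl]
        rw [repl1_cross "adress".toList _ "receive".toList (by decide)]
        rw [repl1_cross "teh".toList _ "receive".toList (by decide)]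
        rw [repl1_cross "occured".toList _ "receive".toList (by decide)]
        rw [show ("recieve".toList ++ r) = 'r' :: ("ecieve".toList ++ r) from rfl, pvScan_cons]
        rw [if_pos (by
          rw [show ('r' :: ("ecieve".toList ++ r)) = "recieve".toList ++ r from rfl]
          exact List.isPrefixOf_iff_prefix.mpr (List.prefix_append _ _))]
        rw [show ("ecieve".toList ++ r).drop 6 = r from by
          rw [show (6 : Nat) = ("ecieve".toList).length from rfl, List.drop_left]]
        congr 1
        exact ih r hlen
      | false =>
      cases h2 : List.isPrefixOf "adress".toList (c :: t) with
      | true =>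
        obtain ⟨r, hr⟩ := List.isPrefixOf_iff_prefix.mp h2
        have hlen : r.length ≤ n := by
          have := congrArg List.length hr
          simp at this; omega
        rw [← hr]
        rw [repl1_cross "recieve".toList _ "adress".toList (by decide)]
        rw [repl1_match "adress".toList _ _ 'a' "dress".toList rfl]
        rw [repl1_cross "teh".toList _ "address".toList (by decide)]
        rw [repl1_cross "occured".toList _ "address".toList (by decide)]
        rw [show ("adress".toList ++ r) = 'a' :: ("dress".toList ++ r) from rfl, pvScan_cons]
        rw [if_neg (by simp [List.isPrefixOf])]
        rw [if_pos (by
          rw [show ('a' :: ("dress".toList ++ r)) = "adress".toList ++ r from rfl]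
          exact List.isPrefixOf_iff_prefix.mpr (List.prefix_append _ _))]
        rw [show ("dress".toList ++ r).drop 5 = r from by
          rw [show (5 : Nat) = ("dress".toList).length from rfl, List.drop_left]]
        congr 1
        exact ih r hlen
      | false =>
      cases h3 : List.isPrefixOf "teh".toList (c :: t) with
      | true =>
        obtain ⟨r, hr⟩ := List.isPrefixOf_iff_prefix.mp h3
        have hlen : r.length ≤ n := by
          have := congrArg List.length hr
          simp at this; omega
        rw [← hr]
        rw [repl1_cross "recieve".toList _ "teh".toList (by decide)]
        rw [repl1_cross "adress".toList _ "teh".toList (by decide)]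
        rw [repl1_match "teh".toList _ _ 't' "eh".toList rfl]
        rw [repl1_cross "occured".toList _ "the".toList (by decide)]
        rw [show ("teh".toList ++ r) = 't' :: ("eh".toList ++ r) from rfl, pvScan_cons]
        rw [if_neg (by simp [List.isPrefixOf])]
        rw [if_neg (by simp [List.isPrefixOf])]
        rw [if_pos (by
          rw [show ('t' :: ("eh".toList ++ r)) = "teh".toList ++ r from rfl]
          exact List.isPrefixOf_iff_prefix.mpr (List.prefix_append _ _))]
        rw [show ("eh".toList ++ r).drop 2 = r from by
          rw [show (2 : Nat) = ("eh".toList).length from rfl, List.drop_left]]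
        congr 1
        exact ih r hlen
      | false =>
      cases h4 : List.isPrefixOf "occured".toList (c :: t) with
      | true =>
        obtain ⟨r, hr⟩ := List.isPrefixOf_iff_prefix.mp h4
        have hlen : r.length ≤ n := by
          have := congrArg List.length hr
          simp at this; omega
        rw [← hr]
        rw [repl1_cross "recieve".toList _ "occured".toList (by decide)]
        rw [repl1_cross "adress".toList _ "occured".toList (by decide)]
        rw [repl1_cross "teh".toList _ "occured".toList (by decide)]
        rw [repl1_match "occured".toList _ _ 'o' "ccured".toList rfl]
        rw [show ("occured".toList ++ r) = 'o' :: ("ccured".toList ++ r) from rfl, pvScan_cons]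
        rw [if_neg (by simp [List.isPrefixOf])]
        rw [if_neg (by simp [List.isPrefixOf])]
        rw [if_neg (by simp [List.isPrefixOf])]
        rw [if_pos (by
          rw [show ('o' :: ("ccured".toList ++ r)) = "occured".toList ++ r from rfl]
          exact List.isPrefixOf_iff_prefix.mpr (List.prefix_append _ _))]
        rw [show ("ccured".toList ++ r).drop 6 = r from by
          rw [show (6 : Nat) = ("ccured".toList).length from rfl, List.drop_left]]
        congr 1
        exact ih r hlen
      | false =>
        -- no correction matches at this position: all four passes and the scan step over c
        rw [repl1_cons_neg _ _ _ _ h1]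
        have n2 : List.isPrefixOf "adress".toList
            (c :: repl1 "recieve".toList "receive".toList t) = false := by
          simp only [show "adress".toList = 'a' :: "dress".toList from rfl,
            List.isPrefixOf] at h2 ⊢
          rw [repl1_pres "recieve".toList "receive".toList t "dress".toList (by decide)]
          exact h2
        rw [repl1_cons_neg _ _ _ _ n2]
        have n3 : List.isPrefixOf "teh".toList
            (c :: repl1 "adress".toList "address".toList
              (repl1 "recieve".toList "receive".toList t)) = false := by
          simp only [show "teh".toList = 't' :: "eh".toList from rfl,
            List.isPrefixOf] at h3 ⊢
          rw [repl1_pres "adress".toList "address".toList _ "eh".toList (by decide),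
            repl1_pres "recieve".toList "receive".toList t "eh".toList (by decide)]
          exact h3
        rw [repl1_cons_neg _ _ _ _ n3]
        have n4 : List.isPrefixOf "occured".toList
            (c :: repl1 "teh".toList "the".toList
              (repl1 "adress".toList "address".toList
                (repl1 "recieve".toList "receive".toList t))) = false := by
          simp only [show "occured".toList = 'o' :: "ccured".toList from rfl,
            List.isPrefixOf] at h4 ⊢
          rw [repl1_pres "teh".toList "the".toList _ "ccured".toList (by decide),
            repl1_pres "adress".toList "address".toList _ "ccured".toList (by decide),
            repl1_pres "recieve".toList "receive".toList t "ccured".toList (by decide)]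
          exact h4
        rw [repl1_cons_neg _ _ _ _ n4]
        rw [pvScan_cons, if_neg (by rw [h1]; simp), if_neg (by rw [h2]; simp),
          if_neg (by rw [h3]; simp), if_neg (by rw [h4]; simp)]
        congr 1
        exact ih t (by omega)

theorem toList_gc (text : String) :
    (grammar_check text).toList = pvScan text.toList := by
  have hA : grammar_check text =
      PySem.Str.replace (PySem.Str.replace (PySem.Str.replace
        (PySem.Str.replace text "recieve" "receive") "adress" "address") "teh" "the")
        "occured" "occurred" := rfl
  rw [hA]
  simp only [PySem.Str.toList_replace]
  rw [replace_eq_repl1 _ _ _ (by decide), replace_eq_repl1 _ _ _ (by decide),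
    replace_eq_repl1 _ _ _ (by decide), replace_eq_repl1 _ _ _ (by decide)]
  exact four_eq_scan text.toList.length text.toList le_rfl

-- ===== VERDICT (by name: the statement is the Claim_ definition above) =====
theorem grammar_check_spec : Claim_equal_grammar_check := by
  intro text _
  unfold Spec_grammar_check grammar_check_alt
  rw [← toList_gc text, String.ofList_toList]
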